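-- pv_equiv track=rewrite | github.com/danielstoopendahl/dotfiles | .config/Code - OSS/User/History/29dcd485/Av70.py | valueOfChars
-- ===== SOURCE A (Python) =====
-- digitnames = ["zero", "one", "two", "three", "four", "five", "six", "seven", "eight", "nine"]
--
-- def valueOfChars(line, i):
--     value = -1
--     substr = line[i:]
--     for i in range(len(digitnames)):
--         digitname = digitnames[i]
--         lendigit = len(digitname)
--         if substr[0:lendigit] == digitname:
--             value = i
--     return value
-- ===== SOURCE B (Python) =====
-- # B: lookup table keyed by digit word, probing the three distinct word lengths (simpler/idiomatic).
-- digitnames = ["zero", "one", "two", "three", "four", "five", "six", "seven", "eight", "nine"]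
-- _DIGIT_INDEX = {w: k for k, w in enumerate(digitnames)}
--
-- def valueOfChars(line, i):
--     tail = line[i:]
--     for L in (3, 4, 5):
--         idx = _DIGIT_INDEX.get(tail[:L])
--         if idx is not None:
--             return idx
--     return -1
-- ===== Notes on version B (the rewrite author's own statement) =====
-- stated objective: alternative
-- what changed: B replaces A's scan over all ten digit words with startswith-style slice comparisons by a dict keyed by word, built once, probed with the substring at each of the three distinct word lengths (3, 4, 5), returning on the first hit.
import Mathlib
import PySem

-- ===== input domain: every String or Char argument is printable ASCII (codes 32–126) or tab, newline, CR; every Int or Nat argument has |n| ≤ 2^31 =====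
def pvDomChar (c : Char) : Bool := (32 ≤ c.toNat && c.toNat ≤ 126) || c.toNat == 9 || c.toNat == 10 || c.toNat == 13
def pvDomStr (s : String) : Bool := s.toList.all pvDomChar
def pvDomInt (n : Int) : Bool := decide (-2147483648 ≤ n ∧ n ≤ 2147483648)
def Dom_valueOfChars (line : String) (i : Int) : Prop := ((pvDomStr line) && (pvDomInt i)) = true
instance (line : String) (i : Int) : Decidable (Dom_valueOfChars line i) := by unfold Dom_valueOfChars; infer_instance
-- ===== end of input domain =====

-- B replaces A's scan over all ten digit words with a dict keyed by word, probed at the three distinct word lengths (alternative decomposition; equivalence of return values).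

-- ===== PORT A =====
def digitnames : List String :=
  ["zero", "one", "two", "three", "four", "five", "six", "seven", "eight", "nine"]

def valueOfChars (line : String) (i : Int) : Int :=
  let substr := PySem.List.slice line.toList (some i) none
  (PySem.List.pyRange 0 (PySem.List.len digitnames) 1).foldl
    (fun value j =>
      let digitname := PySem.List.pyGetD digitnames j ""
      let lendigit := PySem.Str.len digitname
      if PySem.List.slice substr (some 0) (some lendigit) = digitname.toList
      then j else value)
    (-1)

-- ===== PORT B =====
def digitIndex : PySem.Dict (List Char) Int :=
  PySem.Dict.ofList
    [("zero".toList, 0), ("one".toList, 1), ("two".toList, 2), ("three".toList, 3),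
     ("four".toList, 4), ("five".toList, 5), ("six".toList, 6), ("seven".toList, 7),
     ("eight".toList, 8), ("nine".toList, 9)]

def lookupLens (tail : List Char) : List Int → Int
  | [] => -1
  | L :: rest =>
    match digitIndex.get? (PySem.List.slice tail none (some L)) with
    | some idx => idx
    | none => lookupLens tail rest

def valueOfChars_alt (line : String) (i : Int) : Int :=
  lookupLens (PySem.List.slice line.toList (some i) none) [3, 4, 5]

-- ===== PRECONDITION & SPEC =====
def Spec_valueOfChars (line : String) (i : Int) (out : Int) : Prop := out = valueOfChars_alt line i
instance (line : String) (i : Int) (out : Int) : Decidable (Spec_valueOfChars line i out) := by unfold Spec_valueOfChars; infer_instance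

-- ===== CLAIM (what is proved, stated in full; the proofs are below) =====
def Claim_equal_valueOfChars : Prop := ∀ (line : String) (i : Int), Dom_valueOfChars line i → Spec_valueOfChars line i (valueOfChars line i)

-- ===== LEMMAS AND PROOFS =====
lemma take_ne_long {s L : List Char} {n : Nat} (h : n < L.length) : s.take n ≠ L := by
  intro he
  have := congrArg List.length he
  simp [List.length_take] at this
  omega

lemma take_eq_short {s L : List Char} {m n : Nat} (h : s.take m = L) (hl : L.length < m)
    (hn : L.length ≤ n) : s.take n = L := by
  have hlen := congrArg List.length h
  simp [List.length_take] at hlen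
  have hs : s.length ≤ m := by omega
  rw [List.take_of_length_le hs] at h
  subst h
  exact List.take_of_length_le (by omega)

theorem key (s : List Char) :
    (PySem.List.pyRange 0 (PySem.List.len digitnames) 1).foldl
      (fun value j =>
        let digitname := PySem.List.pyGetD digitnames j ""
        let lendigit := PySem.Str.len digitname
        if PySem.List.slice s (some 0) (some lendigit) = digitname.toList
        then j else value)
      (-1) = lookupLens s [3, 4, 5] := by
  have hr : PySem.List.pyRange 0 (PySem.List.len digitnames) 1 = [0,1,2,3,4,5,6,7,8,9] := by decide
  rw [hr]
  have g0 : PySem.List.pyGetD digitnames (0:Int) "" = "zero" := by decide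
  have g1 : PySem.List.pyGetD digitnames (1:Int) "" = "one" := by decide
  have g2 : PySem.List.pyGetD digitnames (2:Int) "" = "two" := by decide
  have g3 : PySem.List.pyGetD digitnames (3:Int) "" = "three" := by decide
  have g4 : PySem.List.pyGetD digitnames (4:Int) "" = "four" := by decide
  have g5 : PySem.List.pyGetD digitnames (5:Int) "" = "five" := by decide
  have g6 : PySem.List.pyGetD digitnames (6:Int) "" = "six" := by decide
  have g7 : PySem.List.pyGetD digitnames (7:Int) "" = "seven" := by decide
  have g8 : PySem.List.pyGetD digitnames (8:Int) "" = "eight" := by decide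
  have g9 : PySem.List.pyGetD digitnames (9:Int) "" = "nine" := by decide
  have l0 : PySem.Str.len "zero" = (4:Int) := by decide
  have l1 : PySem.Str.len "one" = (3:Int) := by decide
  have l2 : PySem.Str.len "two" = (3:Int) := by decide
  have l3 : PySem.Str.len "three" = (5:Int) := by decide
  have l4 : PySem.Str.len "four" = (4:Int) := by decide
  have l5 : PySem.Str.len "five" = (4:Int) := by decide
  have l6 : PySem.Str.len "six" = (3:Int) := by decide
  have l7 : PySem.Str.len "seven" = (5:Int) := by decide
  have l8 : PySem.Str.len "eight" = (5:Int) := by decide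
  have l9 : PySem.Str.len "nine" = (4:Int) := by decide
  simp only [List.foldl, g0, g1, g2, g3, g4, g5, g6, g7, g8, g9, l0, l1, l2, l3, l4, l5, l6, l7, l8, l9]
  have sl3 : PySem.List.slice s (some 0) (some (3:Int)) = s.take 3 := by simp [PySem.List.slice_to]
  have st3 : PySem.List.slice s none (some (3:Int)) = s.take 3 := by simp [PySem.List.slice_to]
  have sl4 : PySem.List.slice s (some 0) (some (4:Int)) = s.take 4 := by simp [PySem.List.slice_to]
  have st4 : PySem.List.slice s none (some (4:Int)) = s.take 4 := by simp [PySem.List.slice_to]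
  have sl5 : PySem.List.slice s (some 0) (some (5:Int)) = s.take 5 := by simp [PySem.List.slice_to]
  have st5 : PySem.List.slice s none (some (5:Int)) = s.take 5 := by simp [PySem.List.slice_to]
  simp only [sl3, sl4, sl5]
  have hD : digitIndex = PySem.Dict.mk [("zero".toList, 0), ("one".toList, 1), ("two".toList, 2), ("three".toList, 3), ("four".toList, 4), ("five".toList, 5), ("six".toList, 6), ("seven".toList, 7), ("eight".toList, 8), ("nine".toList, 9)] := by decide

  by_cases h9 : s.take 4 = ['n','i','n','e']
  · -- word nine, index 9
    have t3 : s.take 3 = ['n','i','n'] := by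
      have hmin : (s.take 4).take 3 = s.take 3 := by simp [List.take_take]
      rw [← hmin, h9]; decide
    have q3 : digitIndex.get? ['n','i','n'] = none := by decide
    have q4 : digitIndex.get? ['n','i','n','e'] = some (9 : Int) := by decide
    simp [lookupLens, st3, st4, t3, h9, q3, q4]
  by_cases h8 : s.take 5 = ['e','i','g','h','t']
  · -- word eight, index 8
    have t3 : s.take 3 = ['e','i','g'] := by
      have hmin : (s.take 5).take 3 = s.take 3 := by simp [List.take_take]
      rw [← hmin, h8]; decide
    have t4 : s.take 4 = ['e','i','g','h'] := by
      have hmin : (s.take 5).take 4 = s.take 4 := by simp [List.take_take]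
      rw [← hmin, h8]; decide
    have q3 : digitIndex.get? ['e','i','g'] = none := by decide
    have q4 : digitIndex.get? ['e','i','g','h'] = none := by decide
    have q5 : digitIndex.get? ['e','i','g','h','t'] = some (8 : Int) := by decide
    simp [lookupLens, st3, st4, st5, t3, t4, h8, q3, q4, q5]
  by_cases h7 : s.take 5 = ['s','e','v','e','n']
  · -- word seven, index 7
    have t3 : s.take 3 = ['s','e','v'] := by
      have hmin : (s.take 5).take 3 = s.take 3 := by simp [List.take_take]
      rw [← hmin, h7]; decide
    have t4 : s.take 4 = ['s','e','v','e'] := by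
      have hmin : (s.take 5).take 4 = s.take 4 := by simp [List.take_take]
      rw [← hmin, h7]; decide
    have q3 : digitIndex.get? ['s','e','v'] = none := by decide
    have q4 : digitIndex.get? ['s','e','v','e'] = none := by decide
    have q5 : digitIndex.get? ['s','e','v','e','n'] = some (7 : Int) := by decide
    simp [lookupLens, st3, st4, st5, t3, t4, h7, q3, q4, q5]
  by_cases h6 : s.take 3 = ['s','i','x']
  · -- word six, index 6
    have q3 : digitIndex.get? ['s','i','x'] = some (6 : Int) := by decide
    simp [lookupLens, st3, h9, h8, h7, h6, q3]
  by_cases h5 : s.take 4 = ['f','i','v','e']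
  · -- word five, index 5
    have t3 : s.take 3 = ['f','i','v'] := by
      have hmin : (s.take 4).take 3 = s.take 3 := by simp [List.take_take]
      rw [← hmin, h5]; decide
    have q3 : digitIndex.get? ['f','i','v'] = none := by decide
    have q4 : digitIndex.get? ['f','i','v','e'] = some (5 : Int) := by decide
    simp [lookupLens, st3, st4, t3, h8, h7, h5, q3, q4]
  by_cases h4 : s.take 4 = ['f','o','u','r']
  · -- word four, index 4
    have t3 : s.take 3 = ['f','o','u'] := by
      have hmin : (s.take 4).take 3 = s.take 3 := by simp [List.take_take]
      rw [← hmin, h4]; decide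
    have q3 : digitIndex.get? ['f','o','u'] = none := by decide
    have q4 : digitIndex.get? ['f','o','u','r'] = some (4 : Int) := by decide
    simp [lookupLens, st3, st4, t3, h8, h7, h4, q3, q4]
  by_cases h3 : s.take 5 = ['t','h','r','e','e']
  · -- word three, index 3
    have t3 : s.take 3 = ['t','h','r'] := by
      have hmin : (s.take 5).take 3 = s.take 3 := by simp [List.take_take]
      rw [← hmin, h3]; decide
    have t4 : s.take 4 = ['t','h','r','e'] := by
      have hmin : (s.take 5).take 4 = s.take 4 := by simp [List.take_take]
      rw [← hmin, h3]; decide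
    have q3 : digitIndex.get? ['t','h','r'] = none := by decide
    have q4 : digitIndex.get? ['t','h','r','e'] = none := by decide
    have q5 : digitIndex.get? ['t','h','r','e','e'] = some (3 : Int) := by decide
    simp [lookupLens, st3, st4, st5, t3, t4, h3, q3, q4, q5]
  by_cases h2 : s.take 3 = ['t','w','o']
  · -- word two, index 2
    have q3 : digitIndex.get? ['t','w','o'] = some (2 : Int) := by decide
    simp [lookupLens, st3, h9, h8, h7, h5, h4, h3, h2, q3]
  by_cases h1 : s.take 3 = ['o','n','e']
  · -- word one, index 1
    have q3 : digitIndex.get? ['o','n','e'] = some (1 : Int) := by decide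
    simp [lookupLens, st3, h9, h8, h7, h5, h4, h3, h1, q3]
  by_cases h0 : s.take 4 = ['z','e','r','o']
  · -- word zero, index 0
    have t3 : s.take 3 = ['z','e','r'] := by
      have hmin : (s.take 4).take 3 = s.take 3 := by simp [List.take_take]
      rw [← hmin, h0]; decide
    have q3 : digitIndex.get? ['z','e','r'] = none := by decide
    have q4 : digitIndex.get? ['z','e','r','o'] = some (0 : Int) := by decide
    simp [lookupLens, st3, st4, t3, h8, h7, h3, h0, q3, q4]
  -- no digit word matches: both return -1
  have d3_0 : ['z','e','r','o'] ≠ s.take 3 := fun h => take_ne_long (by decide) h.symm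
  have d3_1 : ['o','n','e'] ≠ s.take 3 := fun h => h1 h.symm
  have d3_2 : ['t','w','o'] ≠ s.take 3 := fun h => h2 h.symm
  have d3_3 : ['t','h','r','e','e'] ≠ s.take 3 := fun h => take_ne_long (by decide) h.symm
  have d3_4 : ['f','o','u','r'] ≠ s.take 3 := fun h => take_ne_long (by decide) h.symm
  have d3_5 : ['f','i','v','e'] ≠ s.take 3 := fun h => take_ne_long (by decide) h.symm
  have d3_6 : ['s','i','x'] ≠ s.take 3 := fun h => h6 h.symm
  have d3_7 : ['s','e','v','e','n'] ≠ s.take 3 := fun h => take_ne_long (by decide) h.symm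
  have d3_8 : ['e','i','g','h','t'] ≠ s.take 3 := fun h => take_ne_long (by decide) h.symm
  have d3_9 : ['n','i','n','e'] ≠ s.take 3 := fun h => take_ne_long (by decide) h.symm
  have n3 : digitIndex.get? (s.take 3) = none := by
    simp [hD, PySem.Dict.get?, d3_0, d3_1, d3_2, d3_3, d3_4, d3_5, d3_6, d3_7, d3_8, d3_9]
  have d4_0 : ['z','e','r','o'] ≠ s.take 4 := fun h => h0 h.symm
  have d4_1 : ['o','n','e'] ≠ s.take 4 := fun h => h1 (take_eq_short h.symm (by decide) (by decide))
  have d4_2 : ['t','w','o'] ≠ s.take 4 := fun h => h2 (take_eq_short h.symm (by decide) (by decide))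
  have d4_3 : ['t','h','r','e','e'] ≠ s.take 4 := fun h => take_ne_long (by decide) h.symm
  have d4_4 : ['f','o','u','r'] ≠ s.take 4 := fun h => h4 h.symm
  have d4_5 : ['f','i','v','e'] ≠ s.take 4 := fun h => h5 h.symm
  have d4_6 : ['s','i','x'] ≠ s.take 4 := fun h => h6 (take_eq_short h.symm (by decide) (by decide))
  have d4_7 : ['s','e','v','e','n'] ≠ s.take 4 := fun h => take_ne_long (by decide) h.symm
  have d4_8 : ['e','i','g','h','t'] ≠ s.take 4 := fun h => take_ne_long (by decide) h.symm
  have d4_9 : ['n','i','n','e'] ≠ s.take 4 := fun h => h9 h.symm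
  have n4 : digitIndex.get? (s.take 4) = none := by
    simp [hD, PySem.Dict.get?, d4_0, d4_1, d4_2, d4_3, d4_4, d4_5, d4_6, d4_7, d4_8, d4_9]
  have d5_0 : ['z','e','r','o'] ≠ s.take 5 := fun h => h0 (take_eq_short h.symm (by decide) (by decide))
  have d5_1 : ['o','n','e'] ≠ s.take 5 := fun h => h1 (take_eq_short h.symm (by decide) (by decide))
  have d5_2 : ['t','w','o'] ≠ s.take 5 := fun h => h2 (take_eq_short h.symm (by decide) (by decide))
  have d5_3 : ['t','h','r','e','e'] ≠ s.take 5 := fun h => h3 h.symm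
  have d5_4 : ['f','o','u','r'] ≠ s.take 5 := fun h => h4 (take_eq_short h.symm (by decide) (by decide))
  have d5_5 : ['f','i','v','e'] ≠ s.take 5 := fun h => h5 (take_eq_short h.symm (by decide) (by decide))
  have d5_6 : ['s','i','x'] ≠ s.take 5 := fun h => h6 (take_eq_short h.symm (by decide) (by decide))
  have d5_7 : ['s','e','v','e','n'] ≠ s.take 5 := fun h => h7 h.symm
  have d5_8 : ['e','i','g','h','t'] ≠ s.take 5 := fun h => h8 h.symm
  have d5_9 : ['n','i','n','e'] ≠ s.take 5 := fun h => h9 (take_eq_short h.symm (by decide) (by decide))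
  have n5 : digitIndex.get? (s.take 5) = none := by
    simp [hD, PySem.Dict.get?, d5_0, d5_1, d5_2, d5_3, d5_4, d5_5, d5_6, d5_7, d5_8, d5_9]
  simp [lookupLens, st3, st4, st5, n3, n4, n5, h9, h8, h7, h6, h5, h4, h3, h2, h1, h0]


-- ===== VERDICT (by name: the statement is the Claim_ definition above) =====
theorem valueOfChars_spec : Claim_equal_valueOfChars := by
  intro line i _
  unfold Spec_valueOfChars valueOfChars valueOfChars_alt
  exact key _
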